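-- pv_equiv track=rewrite | github.com/Packtol-idrice/doc_TP_FOR-_SAMEDI | tpInf.py | fcc
-- ===== SOURCE A (Python) =====
-- def fcc(t,tr,n):
--    s=0
--    i=0
--    while (i<n):
--       s=s+t[i]
--       tr+=[s]
--       i+=1
--    return tr
-- ===== SOURCE B (Python) =====
-- def fcc(t, tr, n):
--     i = 0
--     while i < n:
--         p = 0
--         j = 0
--         while j <= i:
--             p = p + t[j]
--             j += 1
--         tr += [p]
--         i += 1
--     return tr
-- ===== Notes on version B (the rewrite author's own statement) =====
-- stated objective: alternative
-- what changed: B drops A's running accumulator s and instead recomputes each prefix sum from scratch with an inner index loop over t[0..i], so the single accumulator pass becomes nested repeated scanning.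
import Mathlib
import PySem

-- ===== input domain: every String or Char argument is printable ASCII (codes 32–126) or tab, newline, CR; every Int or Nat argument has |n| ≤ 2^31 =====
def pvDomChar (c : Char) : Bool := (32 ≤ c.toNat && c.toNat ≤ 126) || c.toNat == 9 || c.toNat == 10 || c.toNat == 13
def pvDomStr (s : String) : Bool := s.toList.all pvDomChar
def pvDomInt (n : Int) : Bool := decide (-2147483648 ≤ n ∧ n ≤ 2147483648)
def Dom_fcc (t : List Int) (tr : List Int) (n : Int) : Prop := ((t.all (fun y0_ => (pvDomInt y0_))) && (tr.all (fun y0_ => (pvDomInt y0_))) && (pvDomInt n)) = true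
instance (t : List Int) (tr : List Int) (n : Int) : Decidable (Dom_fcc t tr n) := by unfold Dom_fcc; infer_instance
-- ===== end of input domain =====

-- B replaces A's running accumulator with an inner loop recomputing each prefix
-- sum of t from scratch (objective: alternative decomposition; not faster).
-- Both programs mutate tr in place; the claim is about the return value.

-- ===== PORT A =====
-- the while loop of A: fuel = number of remaining iterations (n - i); on an
-- out-of-range t[i] Python raises IndexError (excluded by Pre_), port returns tr
def fccLoopA (t : List Int) : Nat → Int → Int → List Int → List Int
  | 0, _, _, tr => tr
  | k+1, s, i, tr =>
    match PySem.List.pyGet? t i with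
    | none => tr
    | some x => fccLoopA t k (s + x) (i + 1) (tr ++ [s + x])

def fcc (t : List Int) (tr : List Int) (n : Int) : List Int :=
  fccLoopA t n.toNat 0 0 tr

-- ===== PORT B =====
-- B's inner while loop: fuel = i+1 iterations, j from 0, accumulator p
def fccSumB (t : List Int) : Nat → Int → Int → Int
  | 0, _, p => p
  | k+1, j, p =>
    match PySem.List.pyGet? t j with
    | none => p
    | some x => fccSumB t k (j + 1) (p + x)

-- B's outer while loop: fuel = n - i remaining iterations
def fccLoopB (t : List Int) : Nat → Int → List Int → List Int
  | 0, _, tr => tr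
  | k+1, i, tr => fccLoopB t k (i + 1) (tr ++ [fccSumB t (i.toNat + 1) 0 0])

def fcc_alt (t : List Int) (tr : List Int) (n : Int) : List Int :=
  fccLoopB t n.toNat 0 tr

-- ===== PRECONDITION & SPEC =====
-- A raises IndexError when n exceeds len(t); exactly those inputs are excluded.
def Pre_fcc (t : List Int) (tr : List Int) (n : Int) : Prop := n ≤ (t.length : Int)
instance (t : List Int) (tr : List Int) (n : Int) : Decidable (Pre_fcc t tr n) := by unfold Pre_fcc; infer_instance
def pvWitness_fcc : List Int × List Int × Int := ([1, 2, 3], [7], 3)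

def Spec_fcc (t : List Int) (tr : List Int) (n : Int) (out : List Int) : Prop := out = fcc_alt t tr n
instance (t : List Int) (tr : List Int) (n : Int) (out : List Int) : Decidable (Spec_fcc t tr n out) := by unfold Spec_fcc; infer_instance

-- ===== CLAIM (what is proved, stated in full; the proofs are below) =====
def Claim_equal_fcc : Prop := ∀ (t : List Int) (tr : List Int) (n : Int), Dom_fcc t tr n → Pre_fcc t tr n → Spec_fcc t tr n (fcc t tr n)

-- ===== LEMMAS AND PROOFS =====

-- B's inner loop, started at j with fuel k staying in range, sums the next k
-- elements of t.
theorem fccSumB_eq (t : List Int) : ∀ (k : Nat) (j p : Int), 0 ≤ j →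
    j.toNat + k ≤ t.length →
    fccSumB t k j p = p + (((t.drop j.toNat).take k).sum) := by
  intro k
  induction k with
  | zero => intro j p _ _; simp [fccSumB]
  | succ m ih =>
    intro j p hj hk
    have hlt : j.toNat < t.length := by omega
    have hget : PySem.List.pyGet? t j = some t[j.toNat] := by
      rw [PySem.List.pyGet?_of_nonneg t hj]
      simp [List.getElem?_eq_getElem hlt]
    simp only [fccSumB, hget]
    have hj1 : (0:Int) ≤ j + 1 := by omega
    have hjn : (j+1).toNat = j.toNat + 1 := by omega
    rw [ih (j+1) (p + t[j.toNat]) hj1 (by omega)]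
    have hdrop : t.drop j.toNat = t[j.toNat] :: t.drop (j.toNat + 1) :=
      List.drop_eq_getElem_cons hlt
    rw [hjn, hdrop, List.take_succ_cons, List.sum_cons]
    ring

-- main invariant: with s the sum of the first i elements, both loops agree
theorem fccLoop_eq (t : List Int) : ∀ (k : Nat) (i : Int) (tr : List Int),
    0 ≤ i → i.toNat + k ≤ t.length →
    fccLoopA t k ((t.take i.toNat).sum) i tr = fccLoopB t k i tr := by
  intro k
  induction k with
  | zero => intro i tr _ _; rfl
  | succ m ih =>
    intro i tr hi hk
    have hlt : i.toNat < t.length := by omega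
    have hget : PySem.List.pyGet? t i = some t[i.toNat] := by
      rw [PySem.List.pyGet?_of_nonneg t hi]
      simp [List.getElem?_eq_getElem hlt]
    have hi1 : (i+1).toNat = i.toNat + 1 := by omega
    have hsum : (t.take i.toNat).sum + t[i.toNat] = (t.take ((i+1).toNat)).sum := by
      rw [hi1, List.take_add_one, List.getElem?_eq_getElem hlt]
      simp only [Option.toList_some, List.sum_append, List.sum_cons, List.sum_nil]
      ring
    have hinner : fccSumB t (i.toNat + 1) 0 0 = (t.take ((i+1).toNat)).sum := by
      rw [fccSumB_eq t (i.toNat + 1) 0 0 le_rfl (by simpa using hlt), hi1]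
      simp
    simp only [fccLoopA, hget, fccLoopB, hinner, hsum]
    exact ih (i+1) _ (by omega) (by omega)

-- ===== VERDICT (by name: the statement is the Claim_ definition above) =====
theorem fcc_spec : Claim_equal_fcc := by
  intro t tr n _ hpre
  unfold Spec_fcc fcc fcc_alt
  have h0 : ((0:Int)).toNat + n.toNat ≤ t.length := by
    unfold Pre_fcc at hpre; omega
  have := fccLoop_eq t n.toNat 0 tr le_rfl (by simpa using h0)
  simpa using this
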